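-- pv_equiv track=rewrite | github.com/cthacker-udel/GraphAlgos | main.py | perpendicular
-- ===== SOURCE A (Python) =====
-- def perpendicular(n):
--     if n == 0:
--         return 0
--     starter = 1
--     first = False
--     total = 0
--     for i in range(1, n):
--         total += starter
--         starter += 1 if first else 0
--         first = True if not first else False
--     return total
-- ===== SOURCE B (Python) =====
-- def perpendicular(n):
--     # closed form for the loop's partial sum: floor(n*n/4); zero when the loop is empty
--     return n * n // 4 if n > 0 else 0
-- ===== Notes on version B (the rewrite author's own statement) =====
-- stated objective: faster
-- what changed: Replaced the O(n) accumulation loop with the closed-form formula floor(n*n/4) for its partial sum.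
import Mathlib
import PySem

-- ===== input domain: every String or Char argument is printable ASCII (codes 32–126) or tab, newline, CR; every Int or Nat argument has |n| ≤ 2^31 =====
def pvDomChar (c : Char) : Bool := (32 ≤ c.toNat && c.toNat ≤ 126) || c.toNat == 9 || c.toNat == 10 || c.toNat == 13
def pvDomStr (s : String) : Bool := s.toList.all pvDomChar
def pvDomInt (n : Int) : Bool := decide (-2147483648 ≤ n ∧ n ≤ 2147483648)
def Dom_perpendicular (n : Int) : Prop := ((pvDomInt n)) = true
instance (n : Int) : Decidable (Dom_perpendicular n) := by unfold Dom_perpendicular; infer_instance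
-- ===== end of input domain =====

-- B replaces A's O(n) accumulation loop with the closed-form floor(n^2/4); equivalence proved for all n.

-- ===== PORT A =====
-- one loop step: total += starter; starter += 1 if first else 0; first = True if not first else False
def perpStep (s : Int × Bool × Int) (_ : Int) : Int × Bool × Int :=
  let total := s.2.2 + s.1
  let starter := s.1 + (if s.2.1 then 1 else 0)
  let first := if !s.2.1 then true else false
  (starter, first, total)

def perpendicular (n : Int) : Int :=
  if n == 0 then 0
  else ((PySem.List.pyRange 1 n 1).foldl perpStep (1, false, 0)).2.2

-- ===== PORT B =====
def perpendicular_alt (n : Int) : Int :=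
  if n > 0 then PySem.Int.floordiv (n * n) 4 else 0

-- ===== PRECONDITION & SPEC =====
def Spec_perpendicular (n : Int) (out : Int) : Prop := out = perpendicular_alt n
instance (n : Int) (out : Int) : Decidable (Spec_perpendicular n out) := by unfold Spec_perpendicular; infer_instance

-- ===== CLAIM (what is proved, stated in full; the proofs are below) =====
def Claim_equal_perpendicular : Prop := ∀ (n : Int), Dom_perpendicular n → Spec_perpendicular n (perpendicular n)

-- ===== LEMMAS AND PROOFS =====

-- loop invariant: after m iterations the state is (⌊m/2⌋+1, m odd, ⌊(m+1)²/4⌋)... (see statement)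
theorem perp_fold_inv (m : Nat) :
    (PySem.List.pyRange 1 (1 + (m : Int)) 1).foldl perpStep (1, false, 0)
      = ((((m + 2) / 2 : Nat) : Int), decide (m % 2 = 1), (((m + 1) * (m + 1) / 4 : Nat) : Int)) := by
  induction m with
  | zero => simp [PySem.List.pyRange_one_eq_nil]
  | succ k ih =>
    have h : (1 : Int) ≤ 1 + (k : Int) := by omega
    have hsucc : (1 : Int) + ((k + 1 : Nat) : Int) = (1 + (k : Int)) + 1 := by push_cast; ring
    rw [hsucc, PySem.List.pyRange_one_succ_right h, List.foldl_append, ih]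
    simp only [List.foldl_cons, List.foldl_nil, perpStep]
    rcases Nat.even_or_odd k with ⟨j, hj⟩ | ⟨j, hj⟩ <;> subst hj
    · -- k = j + j (even): first = false, starter stays, total gains starter
      have h1 : (j + j) % 2 = 0 := by omega
      have h2 : (j + j + 1) % 2 = 1 := by omega
      have d1 : (j + j + 2) / 2 = j + 1 := by omega
      have d2 : (j + j + 1 + 2) / 2 = j + 1 := by omega
      have d3 : (j + j + 1) * (j + j + 1) / 4 = j * j + j := by
        have : (j + j + 1) * (j + j + 1) = 4 * (j * j + j) + 1 := by ring
        omega
      have d4 : (j + j + 1 + 1) * (j + j + 1 + 1) / 4 = (j + 1) * (j + 1) := by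
        have : (j + j + 1 + 1) * (j + j + 1 + 1) = 4 * ((j + 1) * (j + 1)) := by ring
        omega
      rw [d1, d2, d3, d4]
      simp only [h1, h2]
      norm_num
      all_goals ring
    · -- k = 2j+1 (odd): first = true, starter increments, total gains starter
      have h1 : (2 * j + 1) % 2 = 1 := by omega
      have h2 : (2 * j + 1 + 1) % 2 = 0 := by omega
      have d1 : (2 * j + 1 + 2) / 2 = j + 1 := by omega
      have d2 : (2 * j + 1 + 1 + 2) / 2 = j + 2 := by omega
      have d3 : (2 * j + 1 + 1) * (2 * j + 1 + 1) / 4 = (j + 1) * (j + 1) := by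
        have : (2 * j + 1 + 1) * (2 * j + 1 + 1) = 4 * ((j + 1) * (j + 1)) := by ring
        omega
      have d4 : (2 * j + 1 + 1 + 1) * (2 * j + 1 + 1 + 1) / 4 = (j + 1) * (j + 1) + (j + 1) := by
        have : (2 * j + 1 + 1 + 1) * (2 * j + 1 + 1 + 1) = 4 * ((j + 1) * (j + 1) + (j + 1)) + 1 := by ring
        omega
      rw [d1, d2, d3, d4]
      simp only [h1, h2]
      norm_num
      all_goals ring

-- ===== VERDICT (by name: the statement is the Claim_ definition above) =====
theorem perpendicular_spec : Claim_equal_perpendicular := by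
  intro n _
  unfold Spec_perpendicular perpendicular perpendicular_alt
  by_cases hn : 0 < n
  · have hne : (n == 0) = false := by simp; omega
    simp only [hne, Bool.false_eq_true, if_false, if_pos hn]
    obtain ⟨m, hm⟩ : ∃ m : Nat, n = 1 + (m : Int) := ⟨(n - 1).toNat, by omega⟩
    subst hm
    rw [perp_fold_inv]
    have : (1 + (m : Int)) * (1 + (m : Int)) = (((m + 1) * (m + 1) : Nat) : Int) := by
      push_cast; ring
    rw [this]
    exact_mod_cast PySem.Int.floordiv_natCast ((m + 1) * (m + 1)) 4
  · simp only [if_neg hn]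
    by_cases h0 : n = 0
    · simp [h0]
    · have hne : (n == 0) = false := by simp [h0]
      simp only [hne, Bool.false_eq_true, if_false]
      rw [PySem.List.pyRange_one_eq_nil (by omega)]
      rfl
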